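-- pv_equiv track=rewrite | github.com/prateekpatel712/crop_disease_detection_2images | models/bundles/crop_disease_detection_model_bundle_20260422/scripts/professional_hierarchical_crop_disease_pipeline.py | build_label_maps
-- ===== SOURCE A (Python) =====
-- from collections import Counter, defaultdict
-- from typing import Dict, Iterable, List, Tuple
--
-- def build_label_maps(id_to_label: Dict[int, str]) -> Tuple[Dict[str, int], Dict[str, List[int]]]:
--     label_to_id = {label: label_id for label_id, label in id_to_label.items()}
--     crop_to_ids: Dict[str, List[int]] = defaultdict(list)
--     for label_id, label in id_to_label.items():
--         crop = label.split("::", 1)[0]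
--         crop_to_ids[crop].append(label_id)
--     for ids in crop_to_ids.values():
--         ids.sort()
--     return label_to_id, dict(crop_to_ids)
-- ===== SOURCE B (Python) =====
-- def _insort(bucket, x):
--     i = len(bucket)
--     while i > 0 and x < bucket[i - 1]:
--         i -= 1
--     bucket.insert(i, x)
--
-- def build_label_maps(id_to_label):
--     label_to_id = {}
--     crop_to_ids = {}
--     for label_id, label in id_to_label.items():
--         label_to_id[label] = label_id
--         crop = label.split("::", 1)[0]
--         _insort(crop_to_ids.setdefault(crop, []), label_id)
--     return label_to_id, crop_to_ids
-- ===== Notes on version B (the rewrite author's own statement) =====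
-- stated objective: alternative
-- what changed: A builds label_to_id by a separate dict comprehension, groups ids per crop with a defaultdict, and then sorts every bucket in a second pass; B makes a single fused pass that fills both dicts at once and keeps each bucket sorted by inserting each id at its sorted position (right-to-left scan), trading A's per-bucket sort pass for sorted insertion, which is cheap on nearly-sorted ids but quadratic in a bucket in the worst case.
import Mathlib
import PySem

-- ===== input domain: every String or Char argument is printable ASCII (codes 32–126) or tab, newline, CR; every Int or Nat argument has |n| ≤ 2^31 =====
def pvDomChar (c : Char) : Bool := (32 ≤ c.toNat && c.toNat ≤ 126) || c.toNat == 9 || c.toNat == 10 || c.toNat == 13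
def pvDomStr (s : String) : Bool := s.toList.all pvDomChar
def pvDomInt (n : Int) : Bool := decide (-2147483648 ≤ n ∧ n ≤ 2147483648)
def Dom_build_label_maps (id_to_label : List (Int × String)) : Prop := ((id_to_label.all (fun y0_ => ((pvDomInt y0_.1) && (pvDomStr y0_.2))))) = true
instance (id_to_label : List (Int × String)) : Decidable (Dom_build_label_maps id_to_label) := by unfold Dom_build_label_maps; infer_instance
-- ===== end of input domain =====

-- B fuses A's three passes (dict comprehension, grouping loop, per-bucket sort loop) into one
-- pass that fills both dicts at once and keeps each bucket sorted by inserting every id at its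
-- sorted position, scanning from the right end (alternative decomposition).

-- ===== PORT A =====
-- crop = label.split("::", 1)[0]; the separator "::" is nonempty so splitMax? is some and the
-- resulting list is nonempty: the fallback branch is unreachable
def pyCrop (label : String) : String :=
  match PySem.Str.splitMax? label "::" 1 with
  | some (c :: _) => c
  | _ => label

def build_label_maps (id_to_label : List (Int × String)) : (List (String × Int)) × (List (String × List Int)) :=
  let label_to_id : PySem.Dict String Int :=
    id_to_label.foldl (fun d p => d.insert p.2 p.1) PySem.Dict.empty
  let crop_to_ids : PySem.Dict String (List Int) :=
    id_to_label.foldl (fun d p => d.modify (pyCrop p.2) [] (fun ids => ids ++ [p.1])) PySem.Dict.empty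
  let crop_sorted : PySem.Dict String (List Int) :=
    PySem.Dict.mk (crop_to_ids.items.map (fun kv => (kv.1, PySem.List.sorted kv.2 (fun x => x))))
  (label_to_id.items, crop_sorted.items)

-- ===== PORT B =====
-- _insort(bucket, x): walk i down from len(bucket) while x < bucket[i-1], insert x at i.
-- Ported as structural recursion over the reversed bucket (the same right-to-left walk).
def insRevAux : List Int → Int → List Int
  | [], x => [x]
  | y :: ys, x => if x < y then y :: insRevAux ys x else x :: y :: ys

def insSortedR (bucket : List Int) (x : Int) : List Int :=
  (insRevAux bucket.reverse x).reverse

def build_label_maps_alt (id_to_label : List (Int × String)) : (List (String × Int)) × (List (String × List Int)) :=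
  let st :=
    id_to_label.foldl
      (fun (st : PySem.Dict String Int × PySem.Dict String (List Int)) p =>
        (st.1.insert p.2 p.1,
         st.2.modify (pyCrop p.2) [] (fun ids => insSortedR ids p.1)))
      (PySem.Dict.empty, PySem.Dict.empty)
  (st.1.items, st.2.items)

-- ===== PRECONDITION & SPEC =====
-- Pre_ excludes association lists with duplicate integer keys: they do not represent a Python
-- dict argument (the dict collapses duplicates before either function runs).
def Pre_build_label_maps (id_to_label : List (Int × String)) : Prop :=
  (id_to_label.map Prod.fst).Nodup
instance (id_to_label : List (Int × String)) : Decidable (Pre_build_label_maps id_to_label) := by unfold Pre_build_label_maps; infer_instance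

def pvWitness_build_label_maps : (List (Int × String)) := [(0, "wheat::rust"), (1, "wheat::smut"), (2, "rice")]

def Spec_build_label_maps (id_to_label : List (Int × String)) (out : (List (String × Int)) × (List (String × List Int))) : Prop := out = build_label_maps_alt id_to_label
instance (id_to_label : List (Int × String)) (out : (List (String × Int)) × (List (String × List Int))) : Decidable (Spec_build_label_maps id_to_label out) := by unfold Spec_build_label_maps; infer_instance

-- ===== CLAIM (what is proved, stated in full; the proofs are below) =====
def Claim_equal_build_label_maps : Prop := ∀ (id_to_label : List (Int × String)), Dom_build_label_maps id_to_label → Pre_build_label_maps id_to_label → Spec_build_label_maps id_to_label (build_label_maps id_to_label)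

-- ===== LEMMAS AND PROOFS =====

-- proof-side left-to-right sorted insert (insert after equal elements)
def insSorted : List Int → Int → List Int
  | [], x => [x]
  | y :: ys, x => if y ≤ x then y :: insSorted ys x else x :: y :: ys

theorem insSorted_eq_insertBy (xs : List Int) (x : Int) :
    insSorted xs x = PySem.List.insertBy (fun a b => decide (a < b)) x xs := by
  induction xs with
  | nil => rfl
  | cons y ys ih =>
    simp only [insSorted, PySem.List.insertBy, ih]
    by_cases h : y ≤ x
    · simp [h, not_lt.mpr h]
    · simp [h, lt_of_not_ge h]

theorem insSorted_append_last (ys : List Int) (y x : Int) (h : x < y) :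
    insSorted (ys ++ [y]) x = insSorted ys x ++ [y] := by
  induction ys with
  | nil => simp [insSorted, not_le.mpr h]
  | cons z zs ih =>
    simp only [List.cons_append, insSorted]
    by_cases hz : z ≤ x <;> simp [hz, ih]

theorem insSorted_of_forall_le (xs : List Int) (x : Int) (h : ∀ z ∈ xs, z ≤ x) :
    insSorted xs x = xs ++ [x] := by
  induction xs with
  | nil => rfl
  | cons z zs ih =>
    have hz : z ≤ x := h z (by simp)
    simp only [insSorted, hz, if_true, List.cons_append, List.cons.injEq, true_and]
    exact ih (fun w hw => h w (by simp [hw]))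

-- on a sorted bucket the right-to-left scan of B inserts at the same place
theorem insSortedR_eq_insSorted (xs : List Int) (x : Int) (hs : xs.Pairwise (· ≤ ·)) :
    insSortedR xs x = insSorted xs x := by
  induction xs using List.reverseRecOn with
  | nil => rfl
  | append_singleton ys y ih =>
    have hys : ys.Pairwise (· ≤ ·) := (List.pairwise_append.mp hs).1
    have hle : ∀ z ∈ ys, z ≤ y := fun z hz => (List.pairwise_append.mp hs).2.2 z hz y (by simp)
    simp only [insSortedR, List.reverse_append, List.reverse_cons, List.reverse_nil,
      List.nil_append, List.singleton_append, insRevAux]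
    by_cases hlt : x < y
    · simp only [hlt, if_true, List.reverse_cons]
      rw [show (insRevAux ys.reverse x).reverse = insSortedR ys x from rfl, ih hys,
        insSorted_append_last ys y x hlt]
    · simp only [hlt, if_false, List.reverse_cons, List.reverse_reverse]
      have hall : ∀ z ∈ ys ++ [y], z ≤ x := by
        intro z hz
        have hz' : z ∈ ys ∨ z = y := by simpa using hz
        rcases hz' with h1 | rfl
        · exact le_trans (hle z h1) (not_lt.mp hlt)
        · exact not_lt.mp hlt
      rw [insSorted_of_forall_le (ys ++ [y]) x hall]

-- inserting the last element into the sorted prefix sorts the whole list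
theorem sorted_append_singleton (v : List Int) (x : Int) :
    PySem.List.sorted (v ++ [x]) (fun y => y) = insSorted (PySem.List.sorted v (fun y => y)) x := by
  rw [PySem.List.sorted_eq_foldl_insertBy, PySem.List.sorted_eq_foldl_insertBy,
    List.foldl_append, insSorted_eq_insertBy]
  rfl

theorem getD_find?_sorted (l : List (String × List Int)) (k : String) :
    (Option.map ((fun x : String × List Int => x.2) ∘ fun kv => (kv.1, PySem.List.sorted kv.2 fun y => y))
        (List.find? (fun p => p.1 == k) l)).getD []
      = PySem.List.sorted ((Option.map (fun x : String × List Int => x.2)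
          (List.find? (fun p => p.1 == k) l)).getD []) (fun y => y) := by
  cases List.find? (fun p => p.1 == k) l <;> rfl

-- value map applied to one grouping step of A equals one sorted-insert step of B
theorem map_sorted_modify (l : List (String × List Int)) (k : String) (x : Int) :
    ((PySem.Dict.mk l).modify k [] (fun ids => ids ++ [x])).items.map
        (fun kv => (kv.1, PySem.List.sorted kv.2 (fun y => y)))
      = ((PySem.Dict.mk (l.map (fun kv => (kv.1, PySem.List.sorted kv.2 (fun y => y))))).modify k []
          (fun ids => insSortedR ids x)).items := by
  simp only [PySem.Dict.modify, PySem.Dict.insert, PySem.Dict.contains, PySem.Dict.getD,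
    PySem.Dict.get?, List.any_map, List.find?_map, Option.map_map]
  have hpred : ((fun (p : String × List Int) => p.1 == k) ∘
      (fun kv : String × List Int => (kv.1, PySem.List.sorted kv.2 (fun y => y))))
      = fun p => p.1 == k := rfl
  rw [hpred, getD_find?_sorted,
    insSortedR_eq_insSorted _ x (PySem.List.sorted_pairwise _ _)]
  by_cases hc : (l.any fun p => p.1 == k) = true
  · simp only [hc, if_true, List.map_map]
    congr 1
    funext p
    by_cases hk : (p.1 == k) = true
    · simp [Function.comp, hk, sorted_append_singleton]
    · simp [Function.comp, hk]
  · simp only [hc, Bool.false_eq_true, if_false, List.map_append, List.map_cons, List.map_nil]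
    rw [sorted_append_singleton]

-- the grouping fold of A, value-mapped with sorted, is the sorted-insert fold of B
theorem fold_inv (xs : List (Int × String)) :
    ∀ d : PySem.Dict String (List Int),
      ((xs.foldl (fun d p => d.modify (pyCrop p.2) [] (fun ids => ids ++ [p.1])) d).items).map
          (fun kv => (kv.1, PySem.List.sorted kv.2 fun y => y))
        = (xs.foldl (fun d p => d.modify (pyCrop p.2) [] (fun ids => insSortedR ids p.1))
            (PySem.Dict.mk (d.items.map (fun kv => (kv.1, PySem.List.sorted kv.2 fun y => y))))).items := by
  induction xs with
  | nil => intro d; rfl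
  | cons p xs ih =>
    intro d
    simp only [List.foldl_cons]
    rw [ih, map_sorted_modify]

-- ===== VERDICT (by name: the statement is the Claim_ definition above) =====
theorem build_label_maps_spec : Claim_equal_build_label_maps := by
  intro id_to_label _ _
  unfold Spec_build_label_maps build_label_maps build_label_maps_alt
  rw [PySem.List.foldl_prod_mk
    (f := fun (d : PySem.Dict String Int) (p : Int × String) => d.insert p.2 p.1)
    (g := fun (d : PySem.Dict String (List Int)) (p : Int × String) =>
      d.modify (pyCrop p.2) [] (fun ids => insSortedR ids p.1))]
  dsimp only
  rw [fold_inv]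
  rfl
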